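-- pv_equiv track=rewrite | github.com/SeonWoo05/Data-Structures-and-Algorithms-in-Python | 8. Tree/Complete binary tree.py | tree_by_level
-- ===== SOURCE A (Python) =====
-- def tree_by_level(K,values):
--     def build_tree(level,start,end):
--         if level >= K or start > end:
--             return
--
--         mid = (start + end) // 2
--         levels[level].append(values[mid])
--
--         build_tree(level+1,start,mid-1)
--         build_tree(level+1,mid+1,end)
--
--     levels = [[] for _ in range(K)]
--     build_tree(0,0,len(values)-1)
--     return levels
-- ===== SOURCE B (Python) =====
-- def tree_by_level(K, values):
--     # Iterative level-by-level (BFS) build: keep the list of active index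
--     # intervals for the current level, emit their midpoints left-to-right,
--     # and expand to the next level's intervals.
--     levels = []
--     intervals = [(0, len(values) - 1)]
--     for _ in range(K):
--         row = []
--         nxt = []
--         for s, e in intervals:
--             if s <= e:
--                 m = (s + e) // 2
--                 row.append(values[m])
--                 nxt.append((s, m - 1))
--                 nxt.append((m + 1, e))
--         levels.append(row)
--         intervals = nxt
--     return levels
-- ===== Notes on version B (the rewrite author's own statement) =====
-- stated objective: alternative
-- what changed: A's recursive DFS that mutates preallocated per-level lists is replaced by an iterative breadth-first sweep: the list of active index intervals for the current level is expanded level by level, emitting each level's midpoints left-to-right.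
import Mathlib
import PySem

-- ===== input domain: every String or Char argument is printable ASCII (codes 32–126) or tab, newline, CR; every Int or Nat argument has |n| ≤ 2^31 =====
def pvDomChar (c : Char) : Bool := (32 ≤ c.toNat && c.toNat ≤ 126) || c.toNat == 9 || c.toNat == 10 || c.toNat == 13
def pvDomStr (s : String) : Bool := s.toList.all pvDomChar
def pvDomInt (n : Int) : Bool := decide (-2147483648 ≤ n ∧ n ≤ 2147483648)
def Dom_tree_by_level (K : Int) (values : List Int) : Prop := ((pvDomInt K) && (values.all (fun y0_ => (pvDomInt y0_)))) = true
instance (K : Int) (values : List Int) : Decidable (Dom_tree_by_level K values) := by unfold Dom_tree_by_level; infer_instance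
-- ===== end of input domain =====

-- B replaces A's recursive DFS build with an iterative level-by-level (BFS) sweep
-- over the list of active index intervals; same return value, alternative structure.

-- ===== PORT A =====
-- A's nested `build_tree`, with the mutated `levels` list threaded through.
-- `values[mid]` is always in range on every reachable call (0 ≤ start ≤ mid ≤ end < len),
-- so the `.getD 0` default is never used.
def buildTreeA (K : Int) (values : List Int) (level s e : Int)
    (levels : List (List Int)) : List (List Int) :=
  if level ≥ K ∨ s > e then levels
  else
    let mid := PySem.Int.floordiv (s + e) 2
    let levels1 := levels.modify level.toNat (· ++ [(PySem.List.pyGet? values mid).getD 0])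
    let levels2 := buildTreeA K values (level + 1) s (mid - 1) levels1
    buildTreeA K values (level + 1) (mid + 1) e levels2
termination_by (e - s + 1).toNat
decreasing_by
  · have h := PySem.Int.floordiv_two_mid_bounds (show s ≤ e by omega)
    omega
  · have h := PySem.Int.floordiv_two_mid_bounds (show s ≤ e by omega)
    omega

def tree_by_level (K : Int) (values : List Int) : List (List Int) :=
  buildTreeA K values 0 0 (values.length - 1) (List.replicate K.toNat [])

-- ===== PORT B =====
-- one interval of Source B's inner loop: emit the midpoint value, enqueue the two halves
def stepRowB (values : List Int) (acc : List Int × List (Int × Int)) (p : Int × Int) :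
    List Int × List (Int × Int) :=
  if p.1 ≤ p.2 then
    let m := PySem.Int.floordiv (p.1 + p.2) 2
    (acc.1 ++ [(PySem.List.pyGet? values m).getD 0], acc.2 ++ [(p.1, m - 1), (m + 1, p.2)])
  else acc

def tree_by_level_alt (K : Int) (values : List Int) : List (List Int) :=
  ((List.range K.toNat).foldl
    (fun (st : List (List Int) × List (Int × Int)) _ =>
      let rn := st.2.foldl (stepRowB values) ([], [])
      (st.1 ++ [rn.1], rn.2))
    ([], [(0, values.length - 1)])).1

-- ===== PRECONDITION & SPEC =====
def Spec_tree_by_level (K : Int) (values : List Int) (out : List (List Int)) : Prop := out = tree_by_level_alt K values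
instance (K : Int) (values : List Int) (out : List (List Int)) : Decidable (Spec_tree_by_level K values out) := by unfold Spec_tree_by_level; infer_instance

-- ===== CLAIM (what is proved, stated in full; the proofs are below) =====
def Claim_equal_tree_by_level : Prop := ∀ (K : Int) (values : List Int), Dom_tree_by_level K values → Spec_tree_by_level K values (tree_by_level K values)

-- ===== LEMMAS AND PROOFS =====

-- common spec: the K-level tree of an interval, as a list of level rows
def zipCat : List (List Int) → List (List Int) → List (List Int)
  | [], ys => ys
  | xs, [] => xs
  | x :: xs, y :: ys => (x ++ y) :: zipCat xs ys

def rows (values : List Int) : Nat → Int → Int → List (List Int)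
  | 0, _, _ => []
  | k + 1, s, e =>
    if s ≤ e then
      let m := PySem.Int.floordiv (s + e) 2
      [(PySem.List.pyGet? values m).getD 0] ::
        zipCat (rows values k s (m - 1)) (rows values k (m + 1) e)
    else List.replicate (k + 1) []

def mids (values : List Int) : List (Int × Int) → List Int
  | [] => []
  | p :: I =>
    if p.1 ≤ p.2 then
      (PySem.List.pyGet? values (PySem.Int.floordiv (p.1 + p.2) 2)).getD 0 :: mids values I
    else mids values I

def children : List (Int × Int) → List (Int × Int)
  | [] => []
  | p :: I =>
    if p.1 ≤ p.2 then
      (p.1, PySem.Int.floordiv (p.1 + p.2) 2 - 1) ::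
        (PySem.Int.floordiv (p.1 + p.2) 2 + 1, p.2) :: children I
    else children I

def rowsList (values : List Int) (k : Nat) (I : List (Int × Int)) : List (List Int) :=
  I.foldr (fun p R => zipCat (rows values k p.1 p.2) R) (List.replicate k [])

def applyRows : List (List Int) → Nat → List (List Int) → List (List Int)
  | L, _, [] => L
  | L, i, r :: R => applyRows (L.modify i (· ++ r)) (i + 1) R

-- basic zipCat facts
lemma zipCat_nil_right (xs : List (List Int)) : zipCat xs [] = xs := by
  cases xs <;> simp [zipCat]

lemma length_zipCat (xs ys : List (List Int)) :
    (zipCat xs ys).length = max xs.length ys.length := by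
  induction xs generalizing ys with
  | nil => simp [zipCat]
  | cons x xs ih =>
    cases ys with
    | nil => simp [zipCat]
    | cons y ys => simp [zipCat, ih]

lemma zipCat_assoc (a b c : List (List Int)) :
    zipCat (zipCat a b) c = zipCat a (zipCat b c) := by
  induction a generalizing b c with
  | nil => simp [zipCat]
  | cons x xs ih =>
    cases b with
    | nil => simp [zipCat]
    | cons y ys =>
      cases c with
      | nil => simp [zipCat]
      | cons z zs => simp [zipCat, ih]

lemma zipCat_replicate_nil_left (X : List (List Int)) :
    zipCat (List.replicate X.length []) X = X := by
  induction X with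
  | nil => simp [zipCat]
  | cons x xs ih => simp [List.replicate_succ, zipCat, ih]

lemma zipCat_replicate_nil_right (X : List (List Int)) :
    zipCat X (List.replicate X.length []) = X := by
  induction X with
  | nil => simp [zipCat]
  | cons x xs ih => simp [List.replicate_succ, zipCat, ih]

lemma length_rows (values : List Int) (k : Nat) (s e : Int) :
    (rows values k s e).length = k := by
  induction k generalizing s e with
  | zero => simp [rows]
  | succ k ih =>
    simp only [rows]
    split
    · simp [length_zipCat, ih]
    · simp

lemma rows_pos (values : List Int) (k : Nat) (s e : Int) (h : s ≤ e) :
    rows values (k + 1) s e =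
      [(PySem.List.pyGet? values (PySem.Int.floordiv (s + e) 2)).getD 0] ::
        zipCat (rows values k s (PySem.Int.floordiv (s + e) 2 - 1))
          (rows values k (PySem.Int.floordiv (s + e) 2 + 1) e) := by
  rw [rows, if_pos h]

lemma rows_neg (values : List Int) (k : Nat) (s e : Int) (h : ¬ s ≤ e) :
    rows values (k + 1) s e = List.replicate (k + 1) [] := by
  rw [rows, if_neg h]

lemma rowsList_cons_eq (values : List Int) (k : Nat) (p : Int × Int) (I : List (Int × Int)) :
    rowsList values k (p :: I) = zipCat (rows values k p.1 p.2) (rowsList values k I) := rfl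

lemma applyRows_cons_eq (L : List (List Int)) (i : Nat) (r : List Int) (R : List (List Int)) :
    applyRows L i (r :: R) = applyRows (L.modify i (· ++ r)) (i + 1) R := rfl

lemma length_rowsList (values : List Int) (k : Nat) (I : List (Int × Int)) :
    (rowsList values k I).length = k := by
  induction I with
  | nil => simp [rowsList]
  | cons p I ih =>
    rw [rowsList_cons_eq]
    simp [length_zipCat, length_rows, ih]

-- applyRows facts
lemma modify_comm (L : List (List Int)) (i j : Nat) (f g : List Int → List Int) (h : i ≠ j) :
    (L.modify i f).modify j g = (L.modify j g).modify i f := by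
  apply List.ext_getElem
  · simp
  · intro n h1 h2
    simp only [List.getElem_modify]
    split_ifs <;> simp_all

lemma modify_modify_same (L : List (List Int)) (i : Nat) (r r2 : List Int) :
    (L.modify i (· ++ r)).modify i (· ++ r2) = L.modify i (· ++ (r ++ r2)) := by
  apply List.ext_getElem
  · simp
  · intro n h1 h2
    simp only [List.getElem_modify]
    split_ifs <;> simp

lemma applyRows_modify_lt (R : List (List Int)) (L : List (List Int)) (i j : Nat)
    (f : List Int → List Int) (h : j < i) :
    (applyRows L i R).modify j f = applyRows (L.modify j f) i R := by
  induction R generalizing L i with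
  | nil => simp [applyRows]
  | cons r R ih =>
    simp only [applyRows]
    rw [ih _ _ (by omega), modify_comm _ _ _ _ _ (by omega)]

lemma applyRows_zipCat (R1 : List (List Int)) (R2 : List (List Int))
    (L : List (List Int)) (i : Nat) :
    applyRows (applyRows L i R1) i R2 = applyRows L i (zipCat R1 R2) := by
  induction R1 generalizing R2 L i with
  | nil => simp [applyRows, zipCat]
  | cons r R1 ih =>
    cases R2 with
    | nil => simp [applyRows, zipCat_nil_right]
    | cons r2 R2 =>
      simp only [applyRows, zipCat]
      rw [applyRows_modify_lt _ _ _ _ _ (by omega), modify_modify_same, ih]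

lemma applyRows_replicate_nil (k : Nat) (L : List (List Int)) (i : Nat) :
    applyRows L i (List.replicate k []) = L := by
  induction k generalizing L i with
  | zero => simp [applyRows]
  | succ k ih =>
    simp only [List.replicate_succ, applyRows, List.append_nil]
    have hid : (fun x : List Int => x) = id := rfl
    rw [hid, List.modify_id, ih]

lemma applyRows_cons (x : List Int) (L : List (List Int)) (i : Nat) (R : List (List Int)) :
    applyRows (x :: L) (i + 1) R = x :: applyRows L i R := by
  induction R generalizing x L i with
  | nil => simp [applyRows]
  | cons r R ih =>
    simp only [applyRows, List.modify_cons]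
    simp [ih]

lemma applyRows_replicate_full (R : List (List Int)) :
    applyRows (List.replicate R.length []) 0 R = R := by
  induction R with
  | nil => simp [applyRows]
  | cons r R ih =>
    simp only [List.length_cons, List.replicate_succ, applyRows, List.modify_cons,
      reduceIte, List.nil_append]
    rw [applyRows_cons]
    simp [ih]

-- A's DFS equals the rows spec
lemma buildTreeA_eq (K : Int) (values : List Int) :
    ∀ (n : Nat) (s e level : Int) (L : List (List Int)),
      (e - s + 1).toNat ≤ n → 0 ≤ level →
      buildTreeA K values level s e L =
        applyRows L level.toNat (rows values (K - level).toNat s e) := by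
  intro n
  induction n with
  | zero =>
    intro s e level L hm hl
    rw [buildTreeA]
    have hse : s > e := by omega
    rw [if_pos (Or.inr hse)]
    rcases Nat.eq_zero_or_pos (K - level).toNat with h0 | hpos
    · rw [h0]; simp [rows, applyRows]
    · obtain ⟨k', hk'⟩ : ∃ k', (K - level).toNat = k' + 1 := ⟨(K - level).toNat - 1, by omega⟩
      rw [hk']
      simp only [rows, if_neg (by omega : ¬ s ≤ e)]
      rw [applyRows_replicate_nil]
  | succ n ih =>
    intro s e level L hm hl
    rw [buildTreeA]
    by_cases hc : level ≥ K ∨ s > e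
    · rw [if_pos hc]
      rcases hc with hK | hse
      · have : (K - level).toNat = 0 := by omega
        rw [this]; simp [rows, applyRows]
      · rcases Nat.eq_zero_or_pos (K - level).toNat with h0 | hpos
        · rw [h0]; simp [rows, applyRows]
        · obtain ⟨k', hk'⟩ : ∃ k', (K - level).toNat = k' + 1 := ⟨(K - level).toNat - 1, by omega⟩
          rw [hk']
          simp only [rows, if_neg (by omega : ¬ s ≤ e)]
          rw [applyRows_replicate_nil]
    · rw [if_neg hc]
      rw [not_or] at hc
      simp only [not_le, not_lt] at hc
      obtain ⟨hK, hse⟩ := hc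
      have hmid := PySem.Int.floordiv_two_mid_bounds hse
      set mid := PySem.Int.floordiv (s + e) 2 with hmiddef
      have hk : (K - level).toNat = (K - (level + 1)).toNat + 1 := by omega
      have hl1 : (level + 1).toNat = level.toNat + 1 := by omega
      show buildTreeA K values (level + 1) (mid + 1) e
            (buildTreeA K values (level + 1) s (mid - 1)
              (L.modify level.toNat (· ++ [(PySem.List.pyGet? values mid).getD 0]))) = _
      rw [ih s (mid - 1) (level + 1) _ (by omega) (by omega),
          ih (mid + 1) e (level + 1) _ (by omega) (by omega)]
      rw [hk, rows_pos values _ s e hse, ← hmiddef, applyRows_cons_eq, hl1,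
          applyRows_zipCat]

-- B's fold equals the rows spec
lemma rowsList_zero (values : List Int) (I : List (Int × Int)) :
    rowsList values 0 I = [] := by
  induction I with
  | nil => simp [rowsList]
  | cons p I ih =>
    rw [rowsList_cons_eq, ih]
    simp [rows, zipCat]

lemma rowsList_succ (values : List Int) (k : Nat) (I : List (Int × Int)) :
    rowsList values (k + 1) I = mids values I :: rowsList values k (children I) := by
  induction I with
  | nil => simp [rowsList, mids, children, List.replicate_succ]
  | cons p I ih =>
    rw [rowsList_cons_eq, ih]
    by_cases hp : p.1 ≤ p.2
    · rw [rows_pos values _ _ _ hp,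
          show mids values (p :: I) =
            (PySem.List.pyGet? values (PySem.Int.floordiv (p.1 + p.2) 2)).getD 0 ::
              mids values I from by simp [mids, hp],
          show children (p :: I) =
            (p.1, PySem.Int.floordiv (p.1 + p.2) 2 - 1) ::
              (PySem.Int.floordiv (p.1 + p.2) 2 + 1, p.2) :: children I from by
                simp [children, hp],
          rowsList_cons_eq, rowsList_cons_eq]
      simp only [zipCat]
      rw [zipCat_assoc]
      simp
    · rw [rows_neg values _ _ _ hp,
          show mids values (p :: I) = mids values I from by simp [mids, hp],
          show children (p :: I) = children I from by simp [children, hp],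
          List.replicate_succ]
      simp only [zipCat, List.nil_append]
      congr 1
      have hlen : (rowsList values k (children I)).length = k := length_rowsList values k _
      calc zipCat (List.replicate k []) (rowsList values k (children I))
          = zipCat (List.replicate (rowsList values k (children I)).length [])
              (rowsList values k (children I)) := by rw [hlen]
        _ = rowsList values k (children I) := zipCat_replicate_nil_left _

lemma stepRowB_foldl (values : List Int) (I : List (Int × Int)) :
    ∀ (r : List Int) (c : List (Int × Int)),
      I.foldl (stepRowB values) (r, c) = (r ++ mids values I, c ++ children I) := by
  induction I with
  | nil => intro r c; simp [mids, children]
  | cons p I ih =>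
    intro r c
    simp only [List.foldl_cons, stepRowB]
    by_cases hp : p.1 ≤ p.2
    · rw [if_pos hp, ih]
      simp [mids, children, hp]
    · rw [if_neg hp, ih]
      simp [mids, children, hp]

lemma foldl_const_range {α : Type} (g : α → α) (s : α) (n : Nat) :
    (List.range n).foldl (fun a _ => g a) s = g^[n] s := by
  induction n with
  | zero => simp
  | succ n ih => rw [List.range_succ, List.foldl_append, ih, Function.iterate_succ_apply']; rfl

lemma iterB_eq (values : List Int) :
    ∀ (k : Nat) (acc : List (List Int)) (I : List (Int × Int)),
      ((fun (st : List (List Int) × List (Int × Int)) =>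
          let rn := st.2.foldl (stepRowB values) ([], [])
          (st.1 ++ [rn.1], rn.2))^[k] (acc, I)).1 = acc ++ rowsList values k I := by
  intro k
  induction k with
  | zero => intro acc I; simp [rowsList_zero]
  | succ k ih =>
    intro acc I
    rw [Function.iterate_succ_apply]
    simp only [stepRowB_foldl values I [] [], List.nil_append]
    rw [ih, rowsList_succ]
    simp

lemma rowsList_single (values : List Int) (k : Nat) (s e : Int) :
    rowsList values k [(s, e)] = rows values k s e := by
  simp only [rowsList, List.foldr_cons, List.foldr_nil]
  calc zipCat (rows values k s e) (List.replicate k [])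
      = zipCat (rows values k s e) (List.replicate (rows values k s e).length []) := by
        rw [length_rows]
    _ = rows values k s e := zipCat_replicate_nil_right _

lemma tree_by_level_alt_eq_rows (K : Int) (values : List Int) :
    tree_by_level_alt K values = rows values K.toNat 0 (values.length - 1) := by
  unfold tree_by_level_alt
  rw [foldl_const_range, iterB_eq, rowsList_single]
  simp

lemma tree_by_level_eq_rows (K : Int) (values : List Int) :
    tree_by_level K values = rows values K.toNat 0 (values.length - 1) := by
  unfold tree_by_level
  rw [buildTreeA_eq K values (values.length : Nat) 0 (values.length - 1) 0 _ (by omega) le_rfl]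
  simp only [sub_zero, Int.toNat_zero]
  calc applyRows (List.replicate K.toNat []) 0 (rows values K.toNat 0 (values.length - 1))
      = applyRows (List.replicate (rows values K.toNat 0 (values.length - 1)).length [])
          0 (rows values K.toNat 0 (values.length - 1)) := by rw [length_rows]
    _ = _ := applyRows_replicate_full _

-- ===== VERDICT (by name: the statement is the Claim_ definition above) =====
theorem tree_by_level_spec : Claim_equal_tree_by_level := by
  intro K values _
  unfold Spec_tree_by_level
  rw [tree_by_level_eq_rows, tree_by_level_alt_eq_rows]
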